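-- pv_equiv track=rewrite | github.com/extra-virgin-olive-eul/pe_solutions | 18/PE-P18_VSX.py | path_sum_naive_max
-- ===== SOURCE A (Python) =====
-- def path_sum_naive_max(int_triangle):
--     """
--     Ultra-naive approach: Choose largest number from each pair of adjacents
--     This does not necessarily work - the small example in this problem is a concidence
--     (and how they get you).
--     """
--
--     line_choices = {'0': 0}
--
--     # Start at the start
--     path_sum = int_triangle[0][0]
--     line_pos = 0
--     left_pos = 0
--     right_pos = 0
--
--     for item in range(1, len(int_triangle)):
--         left_pos = line_pos
--
--         # Can't go past end of line
--         if line_pos == len(int_triangle[item]):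
--             right_pos = line_pos
--         else:
--             right_pos = line_pos + 1
--
--         # Find index in next line based on value of each position
--         if int_triangle[item][left_pos] > int_triangle[item][right_pos]:
--             line_pos = left_pos
--         else:
--             line_pos = right_pos
--
--         line_choices[str(item)] = line_pos
--         path_sum += max(int_triangle[item][left_pos], int_triangle[item][right_pos])
--
--     return path_sum, line_choices
-- ===== SOURCE B (Python) =====
-- def path_sum_naive_max(int_triangle):
--     """Recursive decomposition: walk(i, p) returns the greedy tail sum and the
--     tail's (str(row), position) choices built back-to-front on return; the dict
--     is assembled once from that list at the end."""
--     n = len(int_triangle)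
--
--     def walk(i, p):
--         if i == n:
--             return 0, []
--         row = int_triangle[i]
--         q = p if row[p] > row[p + 1] else p + 1
--         tail_sum, tail_choices = walk(i + 1, q)
--         return row[q] + tail_sum, [(str(i), q)] + tail_choices
--
--     s, choices = walk(1, 0)
--     return int_triangle[0][0] + s, dict([('0', 0)] + choices)
-- ===== Notes on version B (the rewrite author's own statement) =====
-- stated objective: alternative
-- what changed: A is one fused forward loop carrying (sum, position, dict); B is a recursive function walk(i,p) that makes the greedy choice and assembles the tail sum and the choice list back-to-front on return, converting the list to a dict once at the end.
import Mathlib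
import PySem

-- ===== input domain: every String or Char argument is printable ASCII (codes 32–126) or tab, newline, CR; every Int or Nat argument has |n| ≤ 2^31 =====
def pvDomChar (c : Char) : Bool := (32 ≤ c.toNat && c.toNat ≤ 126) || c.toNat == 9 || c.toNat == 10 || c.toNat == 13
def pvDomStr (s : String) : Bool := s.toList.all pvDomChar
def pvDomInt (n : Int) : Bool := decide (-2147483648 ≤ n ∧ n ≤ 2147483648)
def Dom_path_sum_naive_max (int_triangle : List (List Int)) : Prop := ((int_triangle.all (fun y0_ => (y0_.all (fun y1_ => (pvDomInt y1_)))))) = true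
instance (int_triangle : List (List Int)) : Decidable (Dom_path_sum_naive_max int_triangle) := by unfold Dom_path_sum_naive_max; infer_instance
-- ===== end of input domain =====

-- B replaces A's fused forward loop by a recursive walk that builds the tail sum and choice list on return; same O(n) cost.
-- Pre_ restricts to triangle-shaped inputs (row i has at least i+1 entries): on ragged inputs the greedy path may run past a
-- row's end and A raises IndexError depending on the data; on some extra inputs A still returns (and B agrees there), but
-- no closed-form condition on the input captures the data-driven path, so Pre_ states the shape that always suffices.


-- ===== PORT A =====
-- the body of A's for-loop (state = (path_sum, line_pos, line_choices)), step for step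
def pvAStep (int_triangle : List (List Int)) (st : Int × Int × PySem.Dict String Int) (item : Int) : Int × Int × PySem.Dict String Int :=
  let s := st.1
  let line_pos := st.2.1
  let d := st.2.2
  let row : List Int := (PySem.List.pyGet? int_triangle item).getD []
  let left_pos := line_pos
  let right_pos : Int := if line_pos = (row.length : Int) then line_pos else line_pos + 1
  let lv : Int := (PySem.List.pyGet? row left_pos).getD 0
  let rv : Int := (PySem.List.pyGet? row right_pos).getD 0
  let new_pos : Int := if lv > rv then left_pos else right_pos
  (s + max lv rv, new_pos, d.insert (PySem.Int.toStr item) new_pos)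

def path_sum_naive_max (int_triangle : List (List Int)) : Int × (List (String × Int)) :=
  let d0 : PySem.Dict String Int := PySem.Dict.empty.insert "0" 0
  -- path_sum = int_triangle[0][0]
  let s0 : Int := ((PySem.List.pyGet? int_triangle 0).bind
                    (fun r => PySem.List.pyGet? r 0)).getD 0
  let st :=
    (PySem.List.pyRange 1 (int_triangle.length : Int) 1).foldl (pvAStep int_triangle) (s0, 0, d0)
  (st.1, st.2.2.items)

-- ===== PORT B =====
-- walk(i, p): greedy choice q for row i, then recurse; tail sum and labelled choice list built on return
def pvWalkB (t : List (List Int)) (n : Nat) (i : Nat) (p : Int) : Int × List (String × Int) :=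
  if i < n then
    let row : List Int := (PySem.List.pyGet? t (i : Int)).getD []
    let q : Int := if (PySem.List.pyGet? row p).getD 0 > (PySem.List.pyGet? row (p + 1)).getD 0
                   then p else p + 1
    let tail := pvWalkB t n (i + 1) q
    ((PySem.List.pyGet? row q).getD 0 + tail.1, (PySem.Int.toStr (i : Int), q) :: tail.2)
  else (0, [])
termination_by n - i

def path_sum_naive_max_alt (int_triangle : List (List Int)) : Int × (List (String × Int)) :=
  let n := int_triangle.length
  let sc := pvWalkB int_triangle n 1 0
  let first : Int := ((PySem.List.pyGet? int_triangle 0).bind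
                       (fun r => PySem.List.pyGet? r 0)).getD 0
  -- dict([('0', 0)] + choices)
  let d : PySem.Dict String Int :=
    (("0", (0 : Int)) :: sc.2).foldl
      (fun (d : PySem.Dict String Int) kv => d.insert kv.1 kv.2) PySem.Dict.empty
  (first + sc.1, d.items)

-- ===== PRECONDITION & SPEC =====
-- Pre_: triangle shape (row i has ≥ i+1 entries). This excludes some ragged inputs on which A happens to return
-- (B agrees there), because without this shape A's IndexError depends on the data-driven greedy path, which no
-- closed-form input condition can express.
def Pre_path_sum_naive_max (int_triangle : List (List Int)) : Prop :=
  int_triangle ≠ [] ∧ ∀ i : Nat, (h : i < int_triangle.length) → i + 1 ≤ int_triangle[i].length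
instance (int_triangle : List (List Int)) : Decidable (Pre_path_sum_naive_max int_triangle) := by
  unfold Pre_path_sum_naive_max; infer_instance
def pvWitness_path_sum_naive_max : List (List Int) := [[3], [7, 4], [2, 4, 6]]

def Spec_path_sum_naive_max (int_triangle : List (List Int)) (out : Int × (List (String × Int))) : Prop := out = path_sum_naive_max_alt int_triangle
instance (int_triangle : List (List Int)) (out : Int × (List (String × Int))) : Decidable (Spec_path_sum_naive_max int_triangle out) := by unfold Spec_path_sum_naive_max; infer_instance

-- ===== CLAIM (what is proved, stated in full; the proofs are below) =====
def Claim_equal_path_sum_naive_max : Prop := ∀ (int_triangle : List (List Int)), Dom_path_sum_naive_max int_triangle → Pre_path_sum_naive_max int_triangle → Spec_path_sum_naive_max int_triangle (path_sum_naive_max int_triangle)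

-- ===== LEMMAS AND PROOFS =====

-- the common greedy step (B's branch; equals A's branch when p ≠ row.length)
def pvStep (row : List Int) (p : Int) : Int :=
  if (PySem.List.pyGet? row p).getD 0 > (PySem.List.pyGet? row (p + 1)).getD 0 then p else p + 1

-- positions chosen after p over the remaining rows
def pvTail (p : Int) : List (List Int) → List Int
  | [] => []
  | r :: rs => pvStep r p :: pvTail (pvStep r p) rs

def pvLast (p : Int) : List (List Int) → Int
  | [] => p
  | r :: rs => pvLast (pvStep r p) rs

def pvIns (d : PySem.Dict String Int) (i : Int) : List Int → PySem.Dict String Int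
  | [] => d
  | q :: qs => pvIns (d.insert (PySem.Int.toStr i) q) (i + 1) qs

def pvLabel (i : Int) : List Int → List (String × Int)
  | [] => []
  | q :: qs => (PySem.Int.toStr i, q) :: pvLabel (i + 1) qs

def pvSum (s : Int) (l : List (List Int × Int)) : Int :=
  l.foldl (fun s pr => s + (PySem.List.pyGet? pr.1 pr.2).getD 0) s

theorem pvSum_acc (l : List (List Int × Int)) : ∀ s : Int, pvSum s l = s + pvSum 0 l := by
  induction l with
  | nil => intro s; simp [pvSum]
  | cons x l ih =>
    intro s
    show pvSum (s + _) l = s + pvSum (0 + _) l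
    rw [ih, ih (0 + _)]
    ring

theorem pv_max_step (row : List Int) (p : Int) :
    max ((PySem.List.pyGet? row p).getD 0) ((PySem.List.pyGet? row (p + 1)).getD 0)
      = (PySem.List.pyGet? row (pvStep row p)).getD 0 := by
  unfold pvStep
  split_ifs with h
  · omega
  · omega

theorem pvIns_eq_foldl (qs : List Int) :
    ∀ (d : PySem.Dict String Int) (i : Int),
    (pvLabel i qs).foldl (fun (d : PySem.Dict String Int) kv => d.insert kv.1 kv.2) d = pvIns d i qs := by
  induction qs with
  | nil => intro d i; rfl
  | cons q qs ih => intro d i; simp only [pvLabel, pvIns, List.foldl_cons]; exact ih _ _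

theorem pvSum_cons (x : List Int × Int) (l : List (List Int × Int)) :
    pvSum 0 (x :: l) = (PySem.List.pyGet? x.1 x.2).getD 0 + pvSum 0 l := by
  have h : pvSum 0 (x :: l) = pvSum (0 + (PySem.List.pyGet? x.1 x.2).getD 0) l := rfl
  rw [h, pvSum_acc]; ring

theorem pv_b_walk (t : List (List Int)) (rs : List (List Int)) :
    ∀ (i : Nat) (p : Int), t.drop i = rs →
    pvWalkB t t.length i p = (pvSum 0 (rs.zip (pvTail p rs)), pvLabel (i : Int) (pvTail p rs)) := by
  induction rs with
  | nil =>
    intro i p hdrop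
    have hlen : t.length ≤ i := by
      have := congrArg List.length hdrop; simp at this; omega
    rw [pvWalkB]
    simp [Nat.not_lt.mpr hlen, pvSum, pvTail, pvLabel]
  | cons r rs ih =>
    intro i p hdrop
    have hi : i < t.length := by
      by_contra h
      rw [List.drop_eq_nil_of_le (by omega)] at hdrop; exact List.cons_ne_nil r rs hdrop.symm
    have hrow : PySem.List.pyGet? t (i : Int) = some r := by
      rw [PySem.List.pyGet?_natCast]
      have : (t.drop i)[0]? = some r := by rw [hdrop]; rfl
      rwa [List.getElem?_drop, Nat.add_zero] at this
    rw [pvWalkB]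
    simp only [if_pos hi, hrow, Option.getD_some]
    have hrec := ih (i + 1) (pvStep r p) (by rw [← List.drop_drop]; rw [hdrop]; rfl)
    rw [show (if (PySem.List.pyGet? r p).getD 0 > (PySem.List.pyGet? r (p + 1)).getD 0 then p else p + 1) = pvStep r p from rfl]
    rw [hrec]
    simp only [pvTail, pvLabel, List.zip_cons_cons]
    refine Prod.ext ?_ ?_
    · show (PySem.List.pyGet? r (pvStep r p)).getD 0 + _ = pvSum 0 ((r, pvStep r p) :: _)
      rw [pvSum_cons]
    · show ((PySem.Int.toStr (i : Int), pvStep r p) :: pvLabel ((i + 1 : Nat) : Int) _) = _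
      push_cast
      rfl

theorem pv_a_loop (t : List (List Int)) (rs : List (List Int)) :
    ∀ (i : Nat) (s p : Int) (d : PySem.Dict String Int),
    t.drop i = rs →
    0 ≤ p → p < (i : Int) →
    (∀ j : Nat, (h : j < rs.length) → i + j + 1 ≤ rs[j].length) →
    (PySem.List.pyRange (i : Int) (t.length : Int) 1).foldl (pvAStep t) (s, p, d)
    = (pvSum s (rs.zip (pvTail p rs)), pvLast p rs, pvIns d (i : Int) (pvTail p rs)) := by
  induction rs with
  | nil =>
    intro i s p d hdrop _ _ _
    have hlen : t.length ≤ i := by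
      have := congrArg List.length hdrop; simp at this; omega
    rw [PySem.List.pyRange_one_eq_nil (by exact_mod_cast hlen)]
    simp [pvSum, pvTail, pvLast, pvIns]
  | cons r rs ih =>
    intro i s p d hdrop hp0 hpi hlen
    have hi : i < t.length := by
      by_contra h
      rw [List.drop_eq_nil_of_le (by omega)] at hdrop; exact List.cons_ne_nil r rs hdrop.symm
    rw [PySem.List.pyRange_one_cons (by exact_mod_cast hi)]
    simp only [List.foldl_cons]
    have hrow : PySem.List.pyGet? t (i : Int) = some r := by
      rw [PySem.List.pyGet?_natCast]
      have : (t.drop i)[0]? = some r := by rw [hdrop]; rfl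
      rwa [List.getElem?_drop, Nat.add_zero] at this
    have hrlen : i + 1 ≤ r.length := by
      have := hlen 0 (by simp); simpa using this
    have hne : ¬ p = (r.length : Int) := by
      intro h; omega
    have happ : pvAStep t (s, p, d) (i : Int)
        = (s + max ((PySem.List.pyGet? r p).getD 0) ((PySem.List.pyGet? r (p + 1)).getD 0),
           pvStep r p, d.insert (PySem.Int.toStr (i : Int)) (pvStep r p)) := by
      simp only [pvAStep, hrow, Option.getD_some, if_neg hne]
      rfl
    rw [happ]
    have hrec := ih (i + 1) (s + max ((PySem.List.pyGet? r p).getD 0) ((PySem.List.pyGet? r (p + 1)).getD 0))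
        (pvStep r p) (d.insert (PySem.Int.toStr (i : Int)) (pvStep r p))
        (by rw [← List.drop_drop]; rw [hdrop]; rfl)
        (by unfold pvStep; split_ifs <;> omega)
        (by unfold pvStep; push_cast; split_ifs <;> omega)
        (by intro j hj; have := hlen (j + 1) (by simpa using Nat.succ_lt_succ hj); simpa [Nat.add_comm, Nat.add_assoc, Nat.add_left_comm] using this)
    rw [show ((i : Int) + 1) = ((i + 1 : Nat) : Int) by push_cast; ring]
    rw [hrec]
    simp only [pvTail, pvLast, pvIns, pvSum, List.zip_cons_cons, List.foldl_cons, pv_max_step]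
    push_cast
    rfl

-- ===== VERDICT (by name: the statement is the Claim_ definition above) =====
theorem path_sum_naive_max_spec : Claim_equal_path_sum_naive_max := by
  intro t _ hpre
  obtain ⟨hnil, hlen⟩ := hpre
  obtain ⟨r0, rs, rfl⟩ : ∃ r0 rs, t = r0 :: rs := by
    cases t with
    | nil => exact absurd rfl hnil
    | cons a l => exact ⟨a, l, rfl⟩
  have hloop := pv_a_loop (r0 :: rs) rs 1 (((PySem.List.pyGet? (r0 :: rs) 0).bind
      (fun r => PySem.List.pyGet? r 0)).getD 0) 0 (PySem.Dict.empty.insert "0" 0)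
      rfl le_rfl (by norm_num)
      (by intro j hj; have := hlen (j + 1) (by simpa using Nat.succ_lt_succ hj); simpa [Nat.add_comm] using this)
  have hwalk := pv_b_walk (r0 :: rs) rs 1 0 rfl
  simp only [Nat.cast_one] at hloop hwalk
  unfold Spec_path_sum_naive_max path_sum_naive_max path_sum_naive_max_alt
  simp only [hloop, hwalk]
  refine Prod.ext ?_ ?_
  · exact pvSum_acc _ _
  · show (pvIns (PySem.Dict.empty.insert "0" 0) 1 (pvTail 0 rs)).items = _
    rw [List.foldl_cons, pvIns_eq_foldl]
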